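-- pv_equiv track=rewrite | github.com/bassyu/ps | programmers/0옹알이.py | solution
-- ===== SOURCE A (Python) =====
-- def solution(babbling):
--     answer = len(babbling)
--     for s in babbling:
--         able = ['aya', 'ye', 'woo', 'ma']
--         i = 0
--         pre = ''
--         while i < len(s):
--             a, b = s[i:i+3], s[i:i+2]
--             if a != pre and a in able:
--                 i += 3
--                 pre = a
--
--             elif b != pre and b in able:
--                 i += 2
--                 pre = b
--
--             else:
--                 answer -= 1
--                 break
--
--     return answer
-- ===== SOURCE B (Python) =====
-- # First characters of the four tokens are distinct, so parsing is deterministic: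
-- # look up the (unique) candidate token by the word's next character and recurse.
-- _TOK = {'a': 'aya', 'y': 'ye', 'w': 'woo', 'm': 'ma'}
--
--
-- def _ok(s, pre):
--     if not s:
--         return True
--     t = _TOK.get(s[0])
--     if t is None or t == pre or not s.startswith(t):
--         return False
--     return _ok(s[len(t):], t)
--
--
-- def solution(babbling):
--     return sum(_ok(s, '') for s in babbling)
-- ===== Notes on version B (the rewrite author's own statement) =====
-- stated objective: simpler
-- what changed: A's index loop that slices both a 3- and a 2-character window and tests membership in a 4-element list rebuilt per word is replaced by a recursive descent that looks up the unique candidate token in a dict keyed by the word's next character (the four tokens have distinct first letters), and the count is a sum of booleans instead of decrements from len(babbling).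
import Mathlib
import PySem

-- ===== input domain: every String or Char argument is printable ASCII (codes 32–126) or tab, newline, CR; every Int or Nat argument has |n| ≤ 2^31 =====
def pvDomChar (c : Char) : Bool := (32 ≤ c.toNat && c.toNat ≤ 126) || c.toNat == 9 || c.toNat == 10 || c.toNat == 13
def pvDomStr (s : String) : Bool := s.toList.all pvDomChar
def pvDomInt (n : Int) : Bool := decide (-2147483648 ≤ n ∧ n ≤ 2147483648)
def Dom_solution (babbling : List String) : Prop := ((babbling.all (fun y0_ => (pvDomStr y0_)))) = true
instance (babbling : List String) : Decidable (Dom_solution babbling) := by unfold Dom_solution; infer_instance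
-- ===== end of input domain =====

-- B replaces A's two-slice/list-membership index loop by a deterministic recursive
-- descent keyed on the next character (the four tokens have distinct first letters);
-- objective: simpler/idiomatic, same asymptotic cost.

-- ===== PORT A =====
-- able = ['aya', 'ye', 'woo', 'ma']
def ableA : List (List Char) := [['a','y','a'], ['y','e'], ['w','o','o'], ['m','a']]

-- the while loop of A: i starts at 0 and only grows, so it is modelled as a Nat
def loopA (s : List Char) (i : Nat) (pre : List Char) : Bool :=
  if h : i < s.length then
    let a := PySem.List.slice s (some (i : Int)) (some ((i + 3 : Nat) : Int))
    let b := PySem.List.slice s (some (i : Int)) (some ((i + 2 : Nat) : Int))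
    if a ≠ pre ∧ a ∈ ableA then loopA s (i + 3) a
    else if b ≠ pre ∧ b ∈ ableA then loopA s (i + 2) b
    else false
  else true
termination_by s.length - i
decreasing_by all_goals omega

def solution (babbling : List String) : Int :=
  babbling.foldl (fun ans s => if loopA s.toList 0 [] then ans else ans - 1)
    ((babbling.length : Int))

-- ===== PORT B =====
-- _TOK = {'a': 'aya', 'y': 'ye', 'w': 'woo', 'm': 'ma'} ; _TOK.get(s[0])
def tokOf (c : Char) : Option (List Char) :=
  if c = 'a' then some ['a','y','a']
  else if c = 'y' then some ['y','e']
  else if c = 'w' then some ['w','o','o']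
  else if c = 'm' then some ['m','a']
  else none

def okB (s : List Char) (pre : List Char) : Bool :=
  match hs : s with
  | [] => true
  | c :: _ =>
    match ht : tokOf c with
    | none => false
    | some t =>
      if t = pre then false
      else if s.take t.length = t then okB (s.drop t.length) t
      else false
termination_by s.length
decreasing_by
  have hpos : 0 < t.length := by
    simp only [tokOf] at ht; split_ifs at ht <;> simp only [Option.some.injEq] at ht <;> first | exact ht.elim | (subst ht; decide)
  subst hs; simp; omega

def solution_alt (babbling : List String) : Int :=
  (babbling.map (fun s => if okB s.toList [] then (1 : Int) else 0)).sum

-- ===== PRECONDITION & SPEC =====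
def Spec_solution (babbling : List String) (out : Int) : Prop := out = solution_alt babbling
instance (babbling : List String) (out : Int) : Decidable (Spec_solution babbling out) := by unfold Spec_solution; infer_instance

-- ===== CLAIM (what is proved, stated in full; the proofs are below) =====
def Claim_equal_solution : Prop := ∀ (babbling : List String), Dom_solution babbling → Spec_solution babbling (solution babbling)

-- ===== LEMMAS AND PROOFS =====

-- non-dependent unfolding of okB on a nonempty list
theorem okB_cons_eq (c : Char) (rest pre : List Char) :
    okB (c :: rest) pre =
      (match tokOf c with
       | none => false
       | some t =>
         if t = pre then false
         else if (c :: rest).take t.length = t then okB ((c :: rest).drop t.length) t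
         else false) := by
  conv_lhs => rw [okB]
  split <;> simp_all

-- one step of A's loop, on a nonempty suffix c :: rest, agrees with one step of okB
theorem step_eq (c : Char) (rest pre : List Char) :
    (if (c :: rest).take 3 ≠ pre ∧ (c :: rest).take 3 ∈ ableA then
       okB ((c :: rest).drop 3) ((c :: rest).take 3)
     else if (c :: rest).take 2 ≠ pre ∧ (c :: rest).take 2 ∈ ableA then
       okB ((c :: rest).drop 2) ((c :: rest).take 2)
     else false) = okB (c :: rest) pre := by
  conv_rhs => rw [okB_cons_eq]
  rcases rest with _ | ⟨x, _ | ⟨y, t⟩⟩ <;>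
    by_cases hca : c = 'a' <;> by_cases hcy : c = 'y' <;>
    by_cases hcw : c = 'w' <;> by_cases hcm : c = 'm' <;>
    simp_all [tokOf, ableA] <;>
    (first
      | ((by_cases hx : x = 'e' <;> simp_all [Bool.and_assoc]); done)
      | ((by_cases hx : x = 'a' <;> simp_all); done)
      | ((by_cases hx : x = 'y' <;> by_cases hy : y = 'a' <;> simp_all [Bool.and_assoc]); done)
      | ((by_cases hx : x = 'o' <;> by_cases hy : y = 'o' <;> simp_all [Bool.and_assoc]); done))

theorem loopA_eq_okB (s : List Char) :
    ∀ k i pre, s.length - i ≤ k → loopA s i pre = okB (s.drop i) pre := by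
  intro k
  induction k with
  | zero =>
    intro i pre hk
    have hge : s.length ≤ i := by omega
    rw [loopA]
    simp [Nat.not_lt.mpr hge, List.drop_eq_nil_of_le hge, okB]
  | succ k ih =>
    intro i pre hk
    by_cases h : i < s.length
    · have e3 : PySem.List.slice s (some (i : Int)) (some ((i + 3 : Nat) : Int))
          = (s.drop i).take 3 := by rw [PySem.List.slice_natCast]; simp
      have e2 : PySem.List.slice s (some (i : Int)) (some ((i + 2 : Nat) : Int))
          = (s.drop i).take 2 := by rw [PySem.List.slice_natCast]; simp
      have d3 : s.drop (i + 3) = (s.drop i).drop 3 := by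
        rw [List.drop_drop, Nat.add_comm]
      have d2 : s.drop (i + 2) = (s.drop i).drop 2 := by
        rw [List.drop_drop, Nat.add_comm]
      rw [loopA]
      simp only [h, dite_true, e3, e2]
      rw [ih (i + 3) ((s.drop i).take 3) (by omega),
          ih (i + 2) ((s.drop i).take 2) (by omega), d3, d2]
      obtain ⟨c, rest, hd⟩ : ∃ c rest, s.drop i = c :: rest := by
        rcases hdd : s.drop i with _ | ⟨c, rest⟩
        · exact absurd (List.drop_eq_nil_iff.mp hdd) (by omega)
        · exact ⟨c, rest, rfl⟩
      rw [hd]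
      exact step_eq c rest pre
    · have hge : s.length ≤ i := by omega
      rw [loopA]
      simp [Nat.not_lt.mpr hge, List.drop_eq_nil_of_le hge, okB]

theorem foldl_sub_eq_sum (p : String → Bool) :
    ∀ (xs : List String) (a : Int),
      xs.foldl (fun ans s => if p s then ans else ans - 1) a
        = a - xs.length + (xs.map (fun s => if p s then (1 : Int) else 0)).sum := by
  intro xs
  induction xs with
  | nil => intro a; simp
  | cons x xs ih =>
    intro a
    simp only [List.foldl_cons, List.map_cons, List.sum_cons, ih]
    by_cases h : p x <;> simp [h] <;> ring

-- ===== VERDICT (by name: the statement is the Claim_ definition above) =====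
theorem solution_spec : Claim_equal_solution := by
  intro babbling _
  unfold Spec_solution solution solution_alt
  rw [foldl_sub_eq_sum (fun s => loopA s.toList 0 [])]
  have : ∀ s : String, loopA s.toList 0 [] = okB s.toList [] := by
    intro s
    simpa using loopA_eq_okB s.toList s.toList.length 0 [] (by omega)
  simp [this]
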